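-- pv_equiv track=rewrite | github.com/quiznat/tot-hf-survey-artifacts | phase2/code/scripts/build_protocol_v4_panels.py | _best_permutation
-- ===== SOURCE A (Python) =====
-- import itertools
-- from typing import Any, Dict, Iterable, List, Sequence, Set, Tuple
--
-- def _best_permutation(digits: Sequence[int], divisor: int) -> int | None:
--     best: int | None = None
--     for perm in itertools.permutations(digits, 4):
--         if perm[0] == 0:
--             continue
--         value = (perm[0] * 1000) + (perm[1] * 100) + (perm[2] * 10) + perm[3]
--         if value % divisor != 0:
--             continue
--         if best is None or value > best:
--             best = value
--     return best
-- ===== SOURCE B (Python) =====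
-- def _best_permutation(digits, divisor):
--     cnt = {}
--     for x in digits:
--         cnt[x] = cnt.get(x, 0) + 1
--     keys = list(cnt)
--     best = None
--     for a in keys:
--         if a == 0:
--             continue
--         cnt[a] -= 1
--         va = a * 1000
--         for b in keys:
--             if cnt[b] > 0:
--                 cnt[b] -= 1
--                 vb = va + b * 100
--                 for c in keys:
--                     if cnt[c] > 0:
--                         cnt[c] -= 1
--                         vc = vb + c * 10
--                         for d in keys:
--                             if cnt[d] > 0:
--                                 v = vc + d
--                                 if v % divisor == 0 and (best is None or v > best):
--                                     best = v
--                         cnt[c] += 1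
--                 cnt[b] += 1
--         cnt[a] += 1
--     return best
-- ===== Notes on version B (the rewrite author's own statement) =====
-- stated objective: faster
-- what changed: B builds a value->count table in one pass and enumerates 4-tuples of DISTINCT digit values with incremental remaining-count bookkeeping, instead of A's scan over all positional 4-permutations, so duplicate digits are never re-examined.
import Mathlib
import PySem

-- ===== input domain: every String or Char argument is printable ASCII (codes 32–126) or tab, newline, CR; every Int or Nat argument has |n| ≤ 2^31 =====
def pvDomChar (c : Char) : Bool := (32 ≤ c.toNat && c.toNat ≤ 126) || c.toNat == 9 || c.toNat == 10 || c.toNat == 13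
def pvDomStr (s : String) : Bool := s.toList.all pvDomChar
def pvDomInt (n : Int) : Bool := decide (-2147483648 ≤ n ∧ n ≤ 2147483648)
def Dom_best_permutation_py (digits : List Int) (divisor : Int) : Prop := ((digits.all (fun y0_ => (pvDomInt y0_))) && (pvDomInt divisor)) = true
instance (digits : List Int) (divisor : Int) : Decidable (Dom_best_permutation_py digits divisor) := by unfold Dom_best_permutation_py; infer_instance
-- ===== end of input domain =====

-- B replaces A's scan over all positional 4-permutations by a scan over 4-tuples of the
-- DISTINCT digit values with a multiplicity check against a value->count table, which is
-- faster on duplicate-heavy inputs; return value only, no side effects.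

-- ===== PORT A =====
-- 'if best is None or value > best: best = value'
def pvUpd (best : Option Int) (value : Int) : Option Int :=
  match best with
  | none => some value
  | some b => if value > b then some value else best

def best_permutation_py (digits : List Int) (divisor : Int) : Option Int :=
  -- for perm in itertools.permutations(digits, 4): …
  (PySem.List.permutations digits 4).foldl (fun best perm =>
    if perm.getD 0 0 = 0 then best
    else
      let value := (perm.getD 0 0) * 1000 + (perm.getD 1 0) * 100 + (perm.getD 2 0) * 10 + perm.getD 3 0
      if PySem.Int.mod value divisor ≠ 0 then best
      else pvUpd best value) none

-- ===== PORT B =====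
def best_permutation_py_alt (digits : List Int) (divisor : Int) : Option Int :=
  -- cnt = {}; for x in digits: cnt[x] = cnt.get(x, 0) + 1
  let cnt : PySem.Dict Int Int := digits.foldl (fun c x => c.insert x (c.getD x 0 + 1)) PySem.Dict.empty
  let keys := cnt.keys
  keys.foldl (fun best a =>
    if a = 0 then best
    else
      -- cnt[a] -= 1 … restored after the loop (pure scoping models the restore)
      let cnt1 := cnt.insert a (cnt.getD a 0 - 1)
      let va := a * 1000
      keys.foldl (fun best b =>
        if cnt1.getD b 0 > 0 then
          let cnt2 := cnt1.insert b (cnt1.getD b 0 - 1)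
          let vb := va + b * 100
          keys.foldl (fun best c =>
            if cnt2.getD c 0 > 0 then
              let cnt3 := cnt2.insert c (cnt2.getD c 0 - 1)
              let vc := vb + c * 10
              keys.foldl (fun best d =>
                if cnt3.getD d 0 > 0 then
                  let v := vc + d
                  if PySem.Int.mod v divisor = 0 then pvUpd best v else best
                else best) best
            else best) best
        else best) best) none

-- ===== PRECONDITION & SPEC =====
-- Pre_ excludes exactly the inputs on which the Python A raises ZeroDivisionError:
-- divisor == 0 while some 4-permutation with a nonzero leading digit exists.
def Pre_best_permutation_py (digits : List Int) (divisor : Int) : Prop :=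
  divisor ≠ 0 ∨ digits.length < 4 ∨ ∀ d ∈ digits, d = 0
instance (digits : List Int) (divisor : Int) : Decidable (Pre_best_permutation_py digits divisor) := by unfold Pre_best_permutation_py; infer_instance

def pvWitness_best_permutation_py : List Int × Int := ([1, 2, 3, 4], 2)

def Spec_best_permutation_py (digits : List Int) (divisor : Int) (out : Option Int) : Prop := out = best_permutation_py_alt digits divisor
instance (digits : List Int) (divisor : Int) (out : Option Int) : Decidable (Spec_best_permutation_py digits divisor out) := by unfold Spec_best_permutation_py; infer_instance

-- ===== CLAIM (what is proved, stated in full; the proofs are below) =====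
def Claim_equal_best_permutation_py : Prop := ∀ (digits : List Int) (divisor : Int), Dom_best_permutation_py digits divisor → Pre_best_permutation_py digits divisor → Spec_best_permutation_py digits divisor (best_permutation_py digits divisor)

-- ===== LEMMAS AND PROOFS =====

-- running maximum: folding pvUpd from some m is foldl max
theorem pvUpd_foldl_some (cs : List Int) (m : Int) :
    cs.foldl pvUpd (some m) = some (cs.foldl max m) := by
  induction cs generalizing m with
  | nil => rfl
  | cons x t ih =>
      simp only [List.foldl_cons]
      have : pvUpd (some m) x = some (max m x) := by
        simp only [pvUpd]
        by_cases h : x > m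
        · rw [if_pos h, max_eq_right h.le]
        · rw [if_neg h, max_eq_left (by omega)]
      rw [this, ih]

theorem pvUpd_foldl_eq_max? (cs : List Int) : cs.foldl pvUpd none = cs.max? := by
  cases cs with
  | nil => rfl
  | cons x t =>
      simp only [List.foldl_cons, List.max?_cons']
      exact pvUpd_foldl_some t x

-- the running maximum only depends on the SET of candidates
theorem pvUpd_foldl_congr (cs₁ cs₂ : List Int) (h : ∀ v, v ∈ cs₁ ↔ v ∈ cs₂) :
    cs₁.foldl pvUpd none = cs₂.foldl pvUpd none := by
  rw [pvUpd_foldl_eq_max?, pvUpd_foldl_eq_max?]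
  cases h₁ : cs₁.max? with
  | none =>
      rw [List.max?_eq_none_iff] at h₁
      subst h₁
      cases h₂ : cs₂.max? with
      | none => rfl
      | some m =>
          rw [List.max?_eq_some_iff] at h₂
          exact absurd ((h m).2 h₂.1) (List.not_mem_nil)
  | some m =>
      rw [List.max?_eq_some_iff] at h₁
      symm
      rw [List.max?_eq_some_iff]
      exact ⟨(h m).1 h₁.1, fun b hb => h₁.2 b ((h b).2 hb)⟩

-- a guarded loop body is a fold of pvUpd over the filterMapped candidates
theorem pvFoldl_guard {α : Type} (g : α → Option Int) (body : Option Int → α → Option Int)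
    (hb : ∀ b x, body b x = match g x with | some v => pvUpd b v | none => b) :
    ∀ (xs : List α) (b : Option Int), xs.foldl body b = (xs.filterMap g).foldl pvUpd b := by
  intro xs
  induction xs with
  | nil => intro b; rfl
  | cons x t ih =>
      intro b
      simp only [List.foldl_cons, List.filterMap_cons, hb]
      cases g x with
      | none => exact ih b
      | some v => simp only [List.foldl_cons]; exact ih (pvUpd b v)

-- a loop whose body folds pvUpd over a list is a fold over the flatMap
theorem pvFoldl_flat {α : Type} (f : α → List Int) :
    ∀ (xs : List α) (b : Option Int),
      xs.foldl (fun b x => (f x).foldl pvUpd b) b = (xs.flatMap f).foldl pvUpd b := by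
  intro xs
  induction xs with
  | nil => intro b; rfl
  | cons x t ih => intro b; simp only [List.foldl_cons, List.flatMap_cons, List.foldl_append, ih]

-- locating a member together with the erase-by-index it induces
theorem pvMem_erase_eraseIdx {a : Int} {xs : List Int} (h : a ∈ xs) :
    ∃ i, i < xs.length ∧ xs[i]? = some a ∧ xs.erase a = xs.eraseIdx i := by
  cases hidx : List.idxOf? a xs with
  | none => exact absurd h (List.idxOf?_eq_none_iff.mp hidx)
  | some i =>
      obtain ⟨hlt, hget, -⟩ := List.idxOf?_eq_some_iff.mp hidx
      refine ⟨i, hlt, ?_, ?_⟩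
      · simp [List.getElem?_eq_getElem hlt, hget]
      · rw [List.erase_eq_eraseIdx, hidx]

-- one unfolding of PySem.List.permutations at a successor length
theorem pvPermutations_succ (xs : List Int) (r : Nat) :
    PySem.List.permutations xs (r + 1) =
      (List.range xs.length).flatMap (fun i =>
        match xs[i]? with
        | none => []
        | some x => (PySem.List.permutations (xs.eraseIdx i) r).map (fun p => x :: p)) := by
  rw [PySem.List.permutations]
  congr 1
  funext i
  rcases xs[i]? with _ | x <;> rfl

-- characterisation: membership in the r-permutations is exactly length + sub-multiset
theorem pvMem_permutations_iff (r : Nat) (xs p : List Int) :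
    p ∈ PySem.List.permutations xs r ↔ p.length = r ∧ p.Subperm xs := by
  constructor
  · intro h
    refine ⟨PySem.List.length_of_mem_permutations h, ?_⟩
    obtain ⟨-, rest, hperm⟩ := PySem.List.exists_perm_of_mem_permutations r xs p h
    exact (List.sublist_append_left p rest).subperm.trans hperm.subperm
  · induction r generalizing xs p with
    | zero =>
        rintro ⟨hl, -⟩
        rw [List.length_eq_zero_iff] at hl
        subst hl
        simp [PySem.List.permutations_zero]
    | succ r ih =>
        rintro ⟨hl, hsub⟩
        cases p with
        | nil => simp at hl
        | cons a t =>
            have ha : a ∈ xs := hsub.subset List.mem_cons_self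
            obtain ⟨i, hlt, hget, herase⟩ := pvMem_erase_eraseIdx ha
            have ht : t.Subperm (xs.eraseIdx i) := by
              rw [← herase]
              exact (List.subperm_cons a).mp (hsub.trans (List.perm_cons_erase ha).subperm)
            have hmem : t ∈ PySem.List.permutations (xs.eraseIdx i) r :=
              ih _ _ ⟨by simpa using hl, ht⟩
            rw [pvPermutations_succ]
            refine List.mem_flatMap.mpr ⟨i, List.mem_range.mpr hlt, ?_⟩
            rw [hget]
            exact List.mem_map.mpr ⟨t, hmem, rfl⟩

-- the 4-digit candidate value
def pvVal (a b c d : Int) : Int := a * 1000 + b * 100 + c * 10 + d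

-- candidate list A: filtered values over the positional 4-permutations
def pvCandA (digits : List Int) (divisor : Int) : List Int :=
  (PySem.List.permutations digits 4).filterMap (fun perm =>
    if perm.getD 0 0 = 0 then none
    else if PySem.Int.mod (pvVal (perm.getD 0 0) (perm.getD 1 0) (perm.getD 2 0) (perm.getD 3 0)) divisor ≠ 0 then none
    else some (pvVal (perm.getD 0 0) (perm.getD 1 0) (perm.getD 2 0) (perm.getD 3 0)))

-- candidate list B: filtered values over 4-tuples of distinct digit values,
-- guarded by the remaining-count bookkeeping of B's loops
def pvCandB (digits : List Int) (divisor : Int) : List Int :=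
  let cnt := PySem.Dict.counter digits
  let keys := cnt.keys
  keys.flatMap (fun a =>
    if a = 0 then []
    else
      let cnt1 := cnt.insert a (cnt.getD a 0 - 1)
      let va := a * 1000
      keys.flatMap (fun b =>
        if cnt1.getD b 0 > 0 then
          let cnt2 := cnt1.insert b (cnt1.getD b 0 - 1)
          let vb := va + b * 100
          keys.flatMap (fun c =>
            if cnt2.getD c 0 > 0 then
              let cnt3 := cnt2.insert c (cnt2.getD c 0 - 1)
              let vc := vb + c * 10
              keys.filterMap (fun d =>
                if cnt3.getD d 0 > 0 then
                  if PySem.Int.mod (vc + d) divisor = 0 then some (vc + d) else none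
                else none)
            else [])
        else []))

theorem pvA_eq_cand (digits : List Int) (divisor : Int) :
    best_permutation_py digits divisor = (pvCandA digits divisor).foldl pvUpd none := by
  unfold best_permutation_py pvCandA
  refine pvFoldl_guard _ _ ?_ _ none
  intro b perm
  simp only [pvVal]
  split_ifs <;> rfl

-- B's innermost loop over d as a fold of pvUpd over the filtered candidates
theorem pvBlevel_d (keys : List Int) (cnt3 : PySem.Dict Int Int) (vc divisor : Int) (best : Option Int) :
    keys.foldl (fun best d =>
        if cnt3.getD d 0 > 0 then
          if PySem.Int.mod (vc + d) divisor = 0 then pvUpd best (vc + d) else best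
        else best) best
      = (keys.filterMap (fun d =>
          if cnt3.getD d 0 > 0 then
            if PySem.Int.mod (vc + d) divisor = 0 then some (vc + d) else none
          else none)).foldl pvUpd best :=
  pvFoldl_guard _ _ (by intro b x; split_ifs <;> rfl) keys best

-- B's loop over c
theorem pvBlevel_c (keys : List Int) (cnt2 : PySem.Dict Int Int) (vb divisor : Int) (best : Option Int) :
    keys.foldl (fun best c =>
        if cnt2.getD c 0 > 0 then
          keys.foldl (fun best d =>
            if (cnt2.insert c (cnt2.getD c 0 - 1)).getD d 0 > 0 then
              if PySem.Int.mod (vb + c * 10 + d) divisor = 0 then pvUpd best (vb + c * 10 + d) else best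
            else best) best
        else best) best
      = (keys.flatMap (fun c =>
          if cnt2.getD c 0 > 0 then
            keys.filterMap (fun d =>
              if (cnt2.insert c (cnt2.getD c 0 - 1)).getD d 0 > 0 then
                if PySem.Int.mod (vb + c * 10 + d) divisor = 0 then some (vb + c * 10 + d) else none
              else none)
          else [])).foldl pvUpd best := by
  rw [← pvFoldl_flat]
  have h : (fun (best : Option Int) (c : Int) =>
        if cnt2.getD c 0 > 0 then
          keys.foldl (fun best d =>
            if (cnt2.insert c (cnt2.getD c 0 - 1)).getD d 0 > 0 then
              if PySem.Int.mod (vb + c * 10 + d) divisor = 0 then pvUpd best (vb + c * 10 + d) else best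
            else best) best
        else best)
      = (fun (best : Option Int) (c : Int) =>
          (if cnt2.getD c 0 > 0 then
            keys.filterMap (fun d =>
              if (cnt2.insert c (cnt2.getD c 0 - 1)).getD d 0 > 0 then
                if PySem.Int.mod (vb + c * 10 + d) divisor = 0 then some (vb + c * 10 + d) else none
              else none)
          else []).foldl pvUpd best) := by
    funext best c
    by_cases hg : cnt2.getD c 0 > 0
    · rw [if_pos hg, if_pos hg]; exact pvBlevel_d keys _ _ divisor best
    · rw [if_neg hg, if_neg hg]; rfl
  rw [h]

-- B's loop over b
theorem pvBlevel_b (keys : List Int) (cnt1 : PySem.Dict Int Int) (va divisor : Int) (best : Option Int) :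
    keys.foldl (fun best b =>
        if cnt1.getD b 0 > 0 then
          keys.foldl (fun best c =>
            if (cnt1.insert b (cnt1.getD b 0 - 1)).getD c 0 > 0 then
              keys.foldl (fun best d =>
                if ((cnt1.insert b (cnt1.getD b 0 - 1)).insert c ((cnt1.insert b (cnt1.getD b 0 - 1)).getD c 0 - 1)).getD d 0 > 0 then
                  if PySem.Int.mod (va + b * 100 + c * 10 + d) divisor = 0 then pvUpd best (va + b * 100 + c * 10 + d) else best
                else best) best
            else best) best
        else best) best
      = (keys.flatMap (fun b =>
          if cnt1.getD b 0 > 0 then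
            keys.flatMap (fun c =>
              if (cnt1.insert b (cnt1.getD b 0 - 1)).getD c 0 > 0 then
                keys.filterMap (fun d =>
                  if ((cnt1.insert b (cnt1.getD b 0 - 1)).insert c ((cnt1.insert b (cnt1.getD b 0 - 1)).getD c 0 - 1)).getD d 0 > 0 then
                    if PySem.Int.mod (va + b * 100 + c * 10 + d) divisor = 0 then some (va + b * 100 + c * 10 + d) else none
                  else none)
              else [])
          else [])).foldl pvUpd best := by
  rw [← pvFoldl_flat]
  have h : ∀ (best : Option Int) (b : Int), (fun (best : Option Int) (b : Int) =>
        if cnt1.getD b 0 > 0 then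
          keys.foldl (fun best c =>
            if (cnt1.insert b (cnt1.getD b 0 - 1)).getD c 0 > 0 then
              keys.foldl (fun best d =>
                if ((cnt1.insert b (cnt1.getD b 0 - 1)).insert c ((cnt1.insert b (cnt1.getD b 0 - 1)).getD c 0 - 1)).getD d 0 > 0 then
                  if PySem.Int.mod (va + b * 100 + c * 10 + d) divisor = 0 then pvUpd best (va + b * 100 + c * 10 + d) else best
                else best) best
            else best) best
        else best) best b
      = (fun (best : Option Int) (b : Int) =>
          (if cnt1.getD b 0 > 0 then
            keys.flatMap (fun c =>
              if (cnt1.insert b (cnt1.getD b 0 - 1)).getD c 0 > 0 then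
                keys.filterMap (fun d =>
                  if ((cnt1.insert b (cnt1.getD b 0 - 1)).insert c ((cnt1.insert b (cnt1.getD b 0 - 1)).getD c 0 - 1)).getD d 0 > 0 then
                    if PySem.Int.mod (va + b * 100 + c * 10 + d) divisor = 0 then some (va + b * 100 + c * 10 + d) else none
                  else none)
              else [])
          else []).foldl pvUpd best) best b := by
    intro best b
    by_cases hg : cnt1.getD b 0 > 0
    · simp only [if_pos hg]; exact pvBlevel_c keys _ _ divisor best
    · simp only [if_neg hg]; rfl
  exact congrArg (fun f => keys.foldl f best) (funext fun best => funext fun b => h best b) ▸ rfl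

theorem pvB_eq_cand (digits : List Int) (divisor : Int) :
    best_permutation_py_alt digits divisor = (pvCandB digits divisor).foldl pvUpd none := by
  unfold best_permutation_py_alt pvCandB
  simp only [PySem.Dict.foldl_insert_getD_add_one_eq_counter]
  rw [← pvFoldl_flat]
  have h : (fun (best : Option Int) (a : Int) =>
        if a = 0 then best
        else
          (PySem.Dict.counter digits).keys.foldl (fun best b =>
            if ((PySem.Dict.counter digits).insert a ((PySem.Dict.counter digits).getD a 0 - 1)).getD b 0 > 0 then
              (PySem.Dict.counter digits).keys.foldl (fun best c =>
                if (((PySem.Dict.counter digits).insert a ((PySem.Dict.counter digits).getD a 0 - 1)).insert b (((PySem.Dict.counter digits).insert a ((PySem.Dict.counter digits).getD a 0 - 1)).getD b 0 - 1)).getD c 0 > 0 then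
                  (PySem.Dict.counter digits).keys.foldl (fun best d =>
                    if ((((PySem.Dict.counter digits).insert a ((PySem.Dict.counter digits).getD a 0 - 1)).insert b (((PySem.Dict.counter digits).insert a ((PySem.Dict.counter digits).getD a 0 - 1)).getD b 0 - 1)).insert c ((((PySem.Dict.counter digits).insert a ((PySem.Dict.counter digits).getD a 0 - 1)).insert b (((PySem.Dict.counter digits).insert a ((PySem.Dict.counter digits).getD a 0 - 1)).getD b 0 - 1)).getD c 0 - 1)).getD d 0 > 0 then
                      if PySem.Int.mod (a * 1000 + b * 100 + c * 10 + d) divisor = 0 then pvUpd best (a * 1000 + b * 100 + c * 10 + d) else best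
                    else best) best
                else best) best
            else best) best)
      = (fun (best : Option Int) (a : Int) =>
          (if a = 0 then ([] : List Int)
           else
            (PySem.Dict.counter digits).keys.flatMap (fun b =>
              if ((PySem.Dict.counter digits).insert a ((PySem.Dict.counter digits).getD a 0 - 1)).getD b 0 > 0 then
                (PySem.Dict.counter digits).keys.flatMap (fun c =>
                  if (((PySem.Dict.counter digits).insert a ((PySem.Dict.counter digits).getD a 0 - 1)).insert b (((PySem.Dict.counter digits).insert a ((PySem.Dict.counter digits).getD a 0 - 1)).getD b 0 - 1)).getD c 0 > 0 then
                    (PySem.Dict.counter digits).keys.filterMap (fun d =>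
                      if ((((PySem.Dict.counter digits).insert a ((PySem.Dict.counter digits).getD a 0 - 1)).insert b (((PySem.Dict.counter digits).insert a ((PySem.Dict.counter digits).getD a 0 - 1)).getD b 0 - 1)).insert c ((((PySem.Dict.counter digits).insert a ((PySem.Dict.counter digits).getD a 0 - 1)).insert b (((PySem.Dict.counter digits).insert a ((PySem.Dict.counter digits).getD a 0 - 1)).getD b 0 - 1)).getD c 0 - 1)).getD d 0 > 0 then
                        if PySem.Int.mod (a * 1000 + b * 100 + c * 10 + d) divisor = 0 then some (a * 1000 + b * 100 + c * 10 + d) else none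
                      else none)
                  else [])
              else [])).foldl pvUpd best) := by
    funext best a
    by_cases ha : a = 0
    · rw [if_pos ha, if_pos ha]; rfl
    · rw [if_neg ha, if_neg ha]; exact pvBlevel_b _ _ _ divisor best
  rw [h]

theorem pvLength_four (p : List Int) : p.length = 4 ↔ ∃ a b c d : Int, p = [a, b, c, d] := by
  constructor
  · intro h
    rcases p with _ | ⟨a, _ | ⟨b, _ | ⟨c, _ | ⟨d, rest⟩⟩⟩⟩ <;> simp_all
  · rintro ⟨a, b, c, d, rfl⟩; rfl

-- the remaining-count guards of B's loops say exactly that [a,b,c,d] is a sub-multiset of digits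
theorem pvGuards_iff (digits : List Int) (a b c d : Int) (ha : a ∈ digits) :
    ((0 : Int) < (if b = a then (digits.count a : Int) - 1 else (digits.count b : Int)) ∧
     (0 : Int) < (if c = b then (if b = a then (digits.count a : Int) - 1 else (digits.count b : Int)) - 1
                  else if c = a then (digits.count a : Int) - 1 else (digits.count c : Int)) ∧
     (0 : Int) < (if d = c then (if c = b then (if b = a then (digits.count a : Int) - 1 else (digits.count b : Int)) - 1
                                 else if c = a then (digits.count a : Int) - 1 else (digits.count c : Int)) - 1
                  else if d = b then (if b = a then (digits.count a : Int) - 1 else (digits.count b : Int)) - 1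
                  else if d = a then (digits.count a : Int) - 1 else (digits.count d : Int)))
      ↔ [a, b, c, d].Subperm digits := by
  rw [List.subperm_ext_iff]
  have hca : 1 ≤ digits.count a := List.one_le_count_iff.mpr ha
  simp only [List.mem_cons, List.not_mem_nil, or_false, List.count_cons, List.count_nil,
    forall_eq_or_imp, forall_eq, beq_iff_eq]
  by_cases h1 : b = a <;> by_cases h2 : c = b <;> by_cases h3 : c = a <;>
    by_cases h4 : d = c <;> by_cases h5 : d = b <;> by_cases h6 : d = a <;>
    simp_all [eq_comm, ← List.one_le_count_iff] <;> omega

theorem pvMem_candA_iff (digits : List Int) (divisor v : Int) :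
    v ∈ pvCandA digits divisor ↔
      ∃ a b c d : Int, [a, b, c, d].Subperm digits ∧ a ≠ 0 ∧
        PySem.Int.mod (pvVal a b c d) divisor = 0 ∧ v = pvVal a b c d := by
  unfold pvCandA
  rw [List.mem_filterMap]
  constructor
  · rintro ⟨perm, hmem, hg⟩
    obtain ⟨hlen, hsub⟩ := (pvMem_permutations_iff 4 digits perm).mp hmem
    obtain ⟨a, b, c, d, rfl⟩ := (pvLength_four perm).mp hlen
    simp only [List.getD_cons_zero, List.getD_cons_succ] at hg
    split_ifs at hg with h0 hm
    rw [not_not] at hm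
    exact ⟨a, b, c, d, hsub, h0, hm, (Option.some.injEq _ _ ▸ hg).symm⟩
  · rintro ⟨a, b, c, d, hsub, ha, hmod, rfl⟩
    refine ⟨[a, b, c, d], (pvMem_permutations_iff 4 digits _).mpr ⟨rfl, hsub⟩, ?_⟩
    simp [ha, hmod]

theorem pvMem_candB_iff (digits : List Int) (divisor v : Int) :
    v ∈ pvCandB digits divisor ↔
      ∃ a b c d : Int, [a, b, c, d].Subperm digits ∧ a ≠ 0 ∧
        PySem.Int.mod (pvVal a b c d) divisor = 0 ∧ v = pvVal a b c d := by
  unfold pvCandB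
  simp only [List.mem_flatMap, PySem.Dict.keys_counter, PySem.Set.mem_ofList, pvVal]
  constructor
  · rintro ⟨a, hamem, hin⟩
    by_cases ha : a = 0
    · simp [ha] at hin
    · rw [if_neg ha] at hin
      simp only [List.mem_flatMap, List.mem_filterMap, PySem.Dict.keys_counter,
        PySem.Set.mem_ofList] at hin
      obtain ⟨b, -, hb⟩ := hin
      split_ifs at hb with h1
      · simp only [List.mem_flatMap, PySem.Dict.keys_counter, PySem.Set.mem_ofList] at hb
        obtain ⟨c, -, hc⟩ := hb
        split_ifs at hc with h2
        · simp only [List.mem_filterMap, PySem.Dict.keys_counter, PySem.Set.mem_ofList] at hc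
          obtain ⟨d, -, hd⟩ := hc
          split_ifs at hd with h3 hm
          · simp only [PySem.Dict.getD_insert, PySem.Dict.getD_counter, gt_iff_lt] at h1 h2 h3
            exact ⟨a, b, c, d,
              (pvGuards_iff digits a b c d hamem).mp ⟨h1, h2, h3⟩, ha, hm,
              (Option.some.injEq _ _ ▸ hd).symm⟩
        · simp at hc
      · simp at hb
  · rintro ⟨a, b, c, d, hsub, ha, hmod, rfl⟩
    have hamem : a ∈ digits := hsub.subset (by simp)
    obtain ⟨h1, h2, h3⟩ := (pvGuards_iff digits a b c d hamem).mpr hsub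
    refine ⟨a, hamem, ?_⟩
    rw [if_neg ha]
    simp only [List.mem_flatMap, PySem.Dict.keys_counter, PySem.Set.mem_ofList,
      PySem.Dict.getD_insert, PySem.Dict.getD_counter, gt_iff_lt]
    refine ⟨b, hsub.subset (by simp), ?_⟩
    rw [if_pos h1]
    simp only [List.mem_flatMap, PySem.Dict.keys_counter, PySem.Set.mem_ofList,
      PySem.Dict.getD_insert, PySem.Dict.getD_counter, gt_iff_lt]
    refine ⟨c, hsub.subset (by simp), ?_⟩
    rw [if_pos h2]
    simp only [List.mem_filterMap, PySem.Dict.keys_counter, PySem.Set.mem_ofList,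
      PySem.Dict.getD_insert, PySem.Dict.getD_counter, gt_iff_lt]
    refine ⟨d, hsub.subset (by simp), ?_⟩
    rw [if_pos h3, if_pos hmod]


-- ===== VERDICT =====
theorem best_permutation_py_spec : Claim_equal_best_permutation_py := by
  intro digits divisor _ _
  unfold Spec_best_permutation_py
  rw [pvA_eq_cand, pvB_eq_cand]
  apply pvUpd_foldl_congr
  intro v
  rw [pvMem_candA_iff, pvMem_candB_iff]
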